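-- pv_equiv track=rewrite | github.com/zwittenb/Final-Project | Visual2.py | group_data_by_season
-- ===== SOURCE A (Python) =====
-- def group_data_by_season(data):
--     season_data = {}
--     season = 2014  # Start from the 2014 season
--     games_per_season = 12
--     game_count = 0
--
--     for total_points, ya in data:
--         if season > 2022:  # Stop at the 2022 season
--             break
--
--         if season not in season_data:
--             season_data[season] = {'total_ya': 0, 'total_points': 0, 'games': 0}
--
--         season_data[season]['total_ya'] += ya
--         season_data[season]['total_points'] += total_points
--         season_data[season]['games'] += 1
--
--         game_count += 1
--         # Adjust for the 2020 season
--         if game_count == 6 and season == 2020: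
--             season += 1
--             game_count = 0
--         elif game_count == games_per_season:
--             season += 1
--             game_count = 0
--
--     return season_data
-- ===== SOURCE B (Python) =====
-- # Staged rewrite: instead of a per-game state machine, compute each season's
-- # game range in closed form, slice the data into per-season chunks, and build
-- # each season's stats wholesale by summing the chunk (objective: alternative).
-- def group_data_by_season(data):
--     season_data = {}
--     for season in range(2014, 2023):
--         lo = 12 * (season - 2014) - (6 if season > 2020 else 0)
--         hi = 12 * (season - 2013) - (6 if season >= 2020 else 0)
--         chunk = data[lo:hi]
--         if chunk:
--             season_data[season] = {
--                 'total_ya': sum(ya for _, ya in chunk),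
--                 'total_points': sum(tp for tp, _ in chunk),
--                 'games': len(chunk),
--             }
--     return season_data
-- ===== Notes on version B (the rewrite author's own statement) =====
-- stated objective: alternative
-- what changed: Replaces A's per-game season/game_count state machine with closed-form per-season game ranges: B slices the data into per-season chunks (12 games per season, 6 for 2020) and builds each season's stats wholesale by summing its chunk.
import Mathlib
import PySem

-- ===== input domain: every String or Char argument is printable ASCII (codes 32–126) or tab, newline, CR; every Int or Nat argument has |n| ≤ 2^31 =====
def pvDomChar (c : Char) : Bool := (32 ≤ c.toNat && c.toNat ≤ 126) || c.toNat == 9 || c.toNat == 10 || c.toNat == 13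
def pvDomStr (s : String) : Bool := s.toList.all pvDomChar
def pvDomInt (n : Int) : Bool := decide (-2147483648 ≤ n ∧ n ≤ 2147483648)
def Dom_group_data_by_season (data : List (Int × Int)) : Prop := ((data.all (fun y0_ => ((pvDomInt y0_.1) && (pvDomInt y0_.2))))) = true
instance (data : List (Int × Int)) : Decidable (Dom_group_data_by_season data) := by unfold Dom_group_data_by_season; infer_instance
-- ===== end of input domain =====

-- B replaces A's per-game season/game_count state machine by closed-form per-season
-- game ranges: it slices the data into per-season chunks and builds each season's
-- stats wholesale by summing the chunk (objective: alternative).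

-- ===== PORT A =====
-- the fresh entry {'total_ya': 0, 'total_points': 0, 'games': 0}
def entryA : PySem.Dict String Int :=
  PySem.Dict.ofList [("total_ya", 0), ("total_points", 0), ("games", 0)]

-- the for-loop of A with its running state (season, game_count); break ports to returning sd
def loopA : List (Int × Int) → Int → Int → PySem.Dict Int (PySem.Dict String Int) →
    PySem.Dict Int (PySem.Dict String Int)
  | [], _, _, sd => sd
  | (total_points, ya) :: rest, season, game_count, sd =>
    if season > 2022 then sd
    else
      let sd := if sd.contains season then sd else sd.insert season entryA
      let sd := sd.modify season PySem.Dict.empty (fun e => e.modify "total_ya" 0 (· + ya))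
      let sd := sd.modify season PySem.Dict.empty (fun e => e.modify "total_points" 0 (· + total_points))
      let sd := sd.modify season PySem.Dict.empty (fun e => e.modify "games" 0 (· + 1))
      let gc := game_count + 1
      if gc = 6 ∧ season = 2020 then loopA rest (season + 1) 0 sd
      else if gc = 12 then loopA rest (season + 1) 0 sd
      else loopA rest season gc sd

def group_data_by_season (data : List (Int × Int)) : List (Int × List (String × Int)) :=
  ((loopA data 2014 0 PySem.Dict.empty).items).map (fun p => (p.1, p.2.items))

-- ===== PORT B =====
-- one iteration of B's for-loop: closed-form game range of `season`, slice, sum the chunk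
def stepB (data : List (Int × Int)) (sd : PySem.Dict Int (PySem.Dict String Int)) (season : Int) :
    PySem.Dict Int (PySem.Dict String Int) :=
  let lo := 12 * (season - 2014) - (if season > 2020 then 6 else 0)
  let hi := 12 * (season - 2013) - (if season ≥ 2020 then 6 else 0)
  let chunk := PySem.List.slice data (some lo) (some hi)
  if chunk ≠ [] then
    sd.insert season (PySem.Dict.ofList
      [("total_ya", (chunk.map (fun g => g.2)).sum),
       ("total_points", (chunk.map (fun g => g.1)).sum),
       ("games", (chunk.length : Int))])
  else sd

def group_data_by_season_alt (data : List (Int × Int)) : List (Int × List (String × Int)) :=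
  (((PySem.List.pyRange 2014 2023 1).foldl (stepB data) PySem.Dict.empty).items).map
    (fun p => (p.1, p.2.items))

-- ===== PRECONDITION & SPEC =====
def Spec_group_data_by_season (data : List (Int × Int)) (out : List (Int × List (String × Int))) : Prop := out = group_data_by_season_alt data
instance (data : List (Int × Int)) (out : List (Int × List (String × Int))) : Decidable (Spec_group_data_by_season data out) := by unfold Spec_group_data_by_season; infer_instance

-- ===== CLAIM (what is proved, stated in full; the proofs are below) =====
def Claim_equal_group_data_by_season : Prop := ∀ (data : List (Int × Int)), Dom_group_data_by_season data → Spec_group_data_by_season data (group_data_by_season data)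

-- ===== LEMMAS AND PROOFS =====

-- proof-side abbreviations for A's loop body
def entry3 (a b c : Int) : PySem.Dict String Int :=
  PySem.Dict.ofList [("total_ya", a), ("total_points", b), ("games", c)]

def addGame (e : PySem.Dict String Int) (g : Int × Int) : PySem.Dict String Int :=
  ((e.modify "total_ya" 0 (· + g.2)).modify "total_points" 0 (· + g.1)).modify "games" 0 (· + 1)

def stepGame (sd : PySem.Dict Int (PySem.Dict String Int)) (season : Int) (g : Int × Int) :
    PySem.Dict Int (PySem.Dict String Int) :=
  let sd := if sd.contains season then sd else sd.insert season entryA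
  let sd := sd.modify season PySem.Dict.empty (fun e => e.modify "total_ya" 0 (· + g.2))
  let sd := sd.modify season PySem.Dict.empty (fun e => e.modify "total_points" 0 (· + g.1))
  sd.modify season PySem.Dict.empty (fun e => e.modify "games" 0 (· + 1))

def applyChunk (sd : PySem.Dict Int (PySem.Dict String Int)) (season : Int)
    (chunk : List (Int × Int)) : PySem.Dict Int (PySem.Dict String Int) :=
  chunk.foldl (fun d g => stepGame d season g) sd

-- season capacity (number of game slots) as Nat
def capN (s : Int) : Nat := if s = 2020 then 6 else 12

-- closed-form start offset of a season's game range
def offI (s : Int) : Int := 12 * (s - 2014) - (if s > 2020 then 6 else 0)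

theorem entry3_congr {a b c a' b' c' : Int} (ha : a = a') (hb : b = b') (hc : c = c') :
    entry3 a b c = entry3 a' b' c' := by subst ha; subst hb; subst hc; rfl

theorem addGame_entry3 (a b c tp ya : Int) :
    addGame (entry3 a b c) (tp, ya) = entry3 (a + ya) (b + tp) (c + 1) := rfl

theorem modify_insert_self {κ ν : Type} [BEq κ] [LawfulBEq κ] (d : PySem.Dict κ ν) (k : κ)
    (d0 : ν) (f : ν → ν) (e : ν) : (d.insert k e).modify k d0 f = d.insert k (f e) := by
  simp [PySem.Dict.modify, PySem.Dict.getD_insert_self, PySem.Dict.insert_insert_self]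

theorem stepGame_insert (sd : PySem.Dict Int (PySem.Dict String Int)) (s : Int)
    (e : PySem.Dict String Int) (g : Int × Int) :
    stepGame (sd.insert s e) s g = sd.insert s (addGame e g) := by
  simp [stepGame, addGame, PySem.Dict.contains_insert_self, modify_insert_self]

theorem stepGame_fresh (sd : PySem.Dict Int (PySem.Dict String Int)) (s : Int) (g : Int × Int)
    (h : sd.contains s = false) : stepGame sd s g = sd.insert s (addGame entryA g) := by
  have : stepGame sd s g = stepGame (sd.insert s entryA) s g := by
    simp [stepGame, h]
  rw [this, stepGame_insert]

theorem applyChunk_insert (chunk : List (Int × Int)) :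
    ∀ (sd : PySem.Dict Int (PySem.Dict String Int)) (s : Int) (e : PySem.Dict String Int),
      applyChunk (sd.insert s e) s chunk = sd.insert s (chunk.foldl addGame e) := by
  induction chunk with
  | nil => intro sd s e; rfl
  | cons g gs ih =>
    intro sd s e
    simp only [applyChunk, List.foldl_cons] at *
    rw [stepGame_insert, ih]

theorem foldl_addGame_entry3 (chunk : List (Int × Int)) :
    ∀ (a b c : Int), chunk.foldl addGame (entry3 a b c) =
      entry3 (a + (chunk.map (fun g => g.2)).sum) (b + (chunk.map (fun g => g.1)).sum)
        (c + chunk.length) := by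
  induction chunk with
  | nil => intro a b c; simp
  | cons g gs ih =>
    intro a b c
    obtain ⟨tp, ya⟩ := g
    simp only [List.foldl_cons, addGame_entry3, ih, List.map_cons, List.sum_cons,
      List.length_cons]
    apply entry3_congr <;> push_cast <;> ring

theorem applyChunk_fresh (sd : PySem.Dict Int (PySem.Dict String Int)) (s : Int)
    (chunk : List (Int × Int)) (h : sd.contains s = false) :
    applyChunk sd s chunk =
      if chunk ≠ [] then
        sd.insert s (entry3 ((chunk.map (fun g => g.2)).sum) ((chunk.map (fun g => g.1)).sum)
          (chunk.length))
      else sd := by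
  cases chunk with
  | nil => rfl
  | cons g gs =>
    obtain ⟨tp, ya⟩ := g
    simp only [applyChunk, List.foldl_cons, ne_eq, reduceCtorEq, not_false_eq_true, if_true]
    rw [stepGame_fresh sd s (tp, ya) h]
    have : addGame entryA (tp, ya) = entry3 ya tp 1 := by
      have : entryA = entry3 0 0 0 := rfl
      rw [this, addGame_entry3]; apply entry3_congr <;> ring
    rw [this]
    have := applyChunk_insert gs sd s (entry3 ya tp 1)
    simp only [applyChunk] at this ⊢
    rw [this, foldl_addGame_entry3]
    congr 1
    refine entry3_congr ?_ ?_ ?_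
    · simp only [List.map_cons, List.sum_cons]
    · simp only [List.map_cons, List.sum_cons]
    · simp only [List.length_cons]; push_cast; ring

-- A immediately stops once the season passes 2022
theorem loopA_gt (data : List (Int × Int)) (s gc : Int)
    (sd : PySem.Dict Int (PySem.Dict String Int)) (h : s > 2022) :
    loopA data s gc sd = sd := by
  cases data with
  | nil => rfl
  | cons g rest => obtain ⟨tp, ya⟩ := g; simp [loopA, h]

-- a chunk that exactly fills the season moves A's state machine to the next season
theorem capN_cast (s : Int) : (capN s : Int) = if s = 2020 then 6 else 12 := by
  unfold capN; split <;> simp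

theorem loopA_full (chunk : List (Int × Int)) :
    ∀ (rest : List (Int × Int)) (s gc : Int) (sd : PySem.Dict Int (PySem.Dict String Int)),
      2014 ≤ s → s ≤ 2022 → 0 ≤ gc → gc < (capN s : Int) →
      gc + chunk.length = (capN s : Int) →
      loopA (chunk ++ rest) s gc sd = loopA rest (s + 1) 0 (applyChunk sd s chunk) := by
  induction chunk with
  | nil =>
    intro rest s gc sd _ _ _ hlt hlen
    simp only [List.length_nil, Int.natCast_zero] at hlen
    omega
  | cons g gs ih =>
    intro rest s gc sd h14 h22 hgc hlt hlen
    obtain ⟨tp, ya⟩ := g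
    have hngt : ¬ s > 2022 := by omega
    rw [capN_cast] at hlt hlen
    simp only [List.length_cons] at hlen
    push_cast at hlen
    simp only [List.cons_append, loopA, if_neg hngt]
    by_cases hend : gc + 1 = 6 ∧ s = 2020
    · have hgs : gs = [] := by
        have : (gs.length : Int) = 0 := by rw [if_pos hend.2] at hlen; omega
        exact List.length_eq_zero_iff.mp (by exact_mod_cast this)
      subst hgs
      simp only [if_pos hend, List.nil_append]
      rfl
    · simp only [if_neg hend]
      by_cases h12 : gc + 1 = 12
      · have hs : s ≠ 2020 := by
          intro h; rw [if_pos h] at hlt; omega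
        have hgs : gs = [] := by
          have : (gs.length : Int) = 0 := by rw [if_neg hs] at hlen; omega
          exact List.length_eq_zero_iff.mp (by exact_mod_cast this)
        subst hgs
        simp only [if_pos h12, List.nil_append]
        rfl
      · simp only [if_neg h12]
        have hnext : gc + 1 < (capN s : Int) := by
          rw [capN_cast]
          by_cases hs : s = 2020
          · rw [if_pos hs] at hlen ⊢
            have : gc + 1 ≠ 6 := fun h => hend ⟨h, hs⟩
            omega
          · rw [if_neg hs] at hlen ⊢
            omega
        have := ih rest s (gc + 1) (stepGame sd s (tp, ya)) h14 h22 (by omega) hnext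
          (by rw [capN_cast]; rw [capN_cast] at hnext; split_ifs at hnext ⊢ <;> omega)
        change loopA (gs ++ rest) s (gc + 1) (stepGame sd s (tp, ya)) = _
        rw [this]
        rfl

-- a chunk too short to fill the season: A consumes it all and stops there
theorem loopA_partial (chunk : List (Int × Int)) :
    ∀ (s gc : Int) (sd : PySem.Dict Int (PySem.Dict String Int)),
      2014 ≤ s → s ≤ 2022 → 0 ≤ gc → gc + chunk.length < (capN s : Int) →
      loopA chunk s gc sd = applyChunk sd s chunk := by
  induction chunk with
  | nil => intro s gc sd _ _ _ _; rfl
  | cons g gs ih =>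
    intro s gc sd h14 h22 hgc hlen
    obtain ⟨tp, ya⟩ := g
    have hngt : ¬ s > 2022 := by omega
    rw [capN_cast] at hlen
    simp only [List.length_cons] at hlen
    push_cast at hlen
    have hend : ¬ (gc + 1 = 6 ∧ s = 2020) := by
      rintro ⟨h6, h20⟩
      rw [if_pos h20] at hlen; omega
    have h12 : gc + 1 ≠ 12 := by
      intro h; split_ifs at hlen <;> omega
    simp only [loopA, if_neg hngt, if_neg hend, if_neg h12]
    change loopA gs s (gc + 1) (stepGame sd s (tp, ya)) = _
    rw [ih s (gc + 1) (stepGame sd s (tp, ya)) h14 h22 (by omega)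
      (by rw [capN_cast]; split_ifs at hlen ⊢ <;> omega)]
    rfl

-- B's loop, unrolled as a recursion over the seasons (fuel n, season s = 2023 - n)
def procB (data : List (Int × Int)) : Nat → Int → PySem.Dict Int (PySem.Dict String Int) →
    PySem.Dict Int (PySem.Dict String Int)
  | 0, _, sd => sd
  | n + 1, s, sd => procB data n (s + 1) (stepB data sd s)

theorem offI_succ (s : Int) : 12 * ((s + 1) - 2014) - (if s + 1 > 2020 then 6 else 0) =
    12 * (s - 2013) - (if s ≥ 2020 then 6 else 0) := by
  split_ifs <;> omega

-- the closed-form range [offI s, offI (s+1)) has length capN s and nonnegative start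
theorem offI_nonneg (s : Int) (h : 2014 ≤ s) : 0 ≤ offI s := by
  unfold offI; split <;> omega

theorem offI_toNat_succ (s : Int) (h14 : 2014 ≤ s) (h22 : s ≤ 2022) :
    (offI (s + 1)).toNat = (offI s).toNat + capN s := by
  unfold offI capN
  split_ifs <;> omega

-- the main invariant: A's loop over the remaining games equals B's remaining seasons
theorem loopA_eq_procB (n : Nat) :
    ∀ (s : Int) (data : List (Int × Int)) (sd : PySem.Dict Int (PySem.Dict String Int)),
      s = 2023 - n → n ≤ 9 → (∀ k : Int, s ≤ k → sd.contains k = false) →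
      loopA (data.drop (offI s).toNat) s 0 sd = procB data n s sd := by
  induction n with
  | zero =>
    intro s data sd hs _ _
    have : s > 2022 := by omega
    rw [loopA_gt _ _ _ _ this]; rfl
  | succ n ih =>
    intro s data sd hs hn hfresh
    have h14 : 2014 ≤ s := by omega
    have h22 : s ≤ 2022 := by omega
    have hcap0 : 0 < capN s := by unfold capN; split <;> norm_num
    set rem := data.drop (offI s).toNat with hrem
    -- the chunk B assigns to season s is exactly what A consumes next
    have hslice : PySem.List.slice data (some (12 * (s - 2014) - (if s > 2020 then 6 else 0)))
        (some (12 * (s - 2013) - (if s ≥ 2020 then 6 else 0))) = rem.take (capN s) := by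
      rw [← offI_succ s]
      have h1 : (0:Int) ≤ offI s := offI_nonneg s h14
      have h2 : (0:Int) ≤ offI (s + 1) := offI_nonneg (s + 1) (by omega)
      have := PySem.List.slice_toNat data h1 h2
      simp only [offI] at this ⊢
      rw [this, hrem]
      congr 1
      have := offI_toNat_succ s h14 h22
      simp only [offI] at this
      omega
    have hstep : stepB data sd s =
        if rem.take (capN s) ≠ [] then
          sd.insert s (entry3 (((rem.take (capN s)).map (fun g => g.2)).sum)
            (((rem.take (capN s)).map (fun g => g.1)).sum) ((rem.take (capN s)).length))
        else sd := by
      simp only [stepB, hslice, entry3]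
    have hfs : sd.contains s = false := hfresh s le_rfl
    have happly : applyChunk sd s (rem.take (capN s)) = stepB data sd s := by
      rw [applyChunk_fresh sd s _ hfs, hstep]
    have hfresh' : ∀ k : Int, s + 1 ≤ k → (stepB data sd s).contains k = false := by
      intro k hk
      rw [hstep]
      split
      · rw [PySem.Dict.contains_insert]
        have : (k == s) = false := by simp; omega
        rw [this, hfresh k (by omega)]
        rfl
      · exact hfresh k (by omega)
    have hrest : rem.drop (capN s) = data.drop (offI (s + 1)).toNat := by
      rw [hrem, List.drop_drop, offI_toNat_succ s h14 h22, Nat.add_comm]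
    by_cases hlong : capN s ≤ rem.length
    · -- full season: chunk has exactly capN s games
      have hsplit : rem = rem.take (capN s) ++ rem.drop (capN s) := (List.take_append_drop _ _).symm
      have hlen : ((rem.take (capN s)).length : Int) = (capN s : Int) := by
        rw [List.length_take]; push_cast; omega
      calc loopA rem s 0 sd
          = loopA (rem.take (capN s) ++ rem.drop (capN s)) s 0 sd := by rw [← hsplit]
        _ = loopA (rem.drop (capN s)) (s + 1) 0 (applyChunk sd s (rem.take (capN s))) := by
            rw [loopA_full _ _ s 0 sd h14 h22 le_rfl (by exact_mod_cast hcap0) (by rw [hlen]; ring)]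
        _ = procB data n (s + 1) (stepB data sd s) := by
            rw [happly, hrest, ih (s + 1) data (stepB data sd s) (by omega) (by omega) hfresh']
        _ = procB data (n + 1) s sd := rfl
    · -- short season: the data runs out inside season s
      have hshort : rem.length < capN s := Nat.lt_of_not_le hlong
      have htake : rem.take (capN s) = rem := List.take_of_length_le (by omega)
      have hdrop : rem.drop (capN s) = [] := List.drop_eq_nil_of_le (by omega)
      have hdataempty : List.drop (offI (s + 1)).toNat data = [] := by
        rw [← hrest]; exact hdrop
      calc loopA rem s 0 sd
          = applyChunk sd s rem := by
            apply loopA_partial rem s 0 sd h14 h22 le_rfl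
            omega
        _ = stepB data sd s := by rw [← happly, htake]
        _ = procB data n (s + 1) (stepB data sd s) := by
            rw [← ih (s + 1) data (stepB data sd s) (by omega) (by omega) hfresh', hdataempty]
            rfl
        _ = procB data (n + 1) s sd := rfl

theorem procB_eq_foldl (data : List (Int × Int)) (sd : PySem.Dict Int (PySem.Dict String Int)) :
    procB data 9 2014 sd = (PySem.List.pyRange 2014 2023 1).foldl (stepB data) sd := by
  have h : PySem.List.pyRange 2014 2023 1 =
      [2014, 2015, 2016, 2017, 2018, 2019, 2020, 2021, 2022] := by decide
  rw [h]
  rfl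

-- ===== VERDICT (by name: the statement is the Claim_ definition above) =====
theorem group_data_by_season_spec : Claim_equal_group_data_by_season := by
  intro data _
  unfold Spec_group_data_by_season group_data_by_season group_data_by_season_alt
  have h0 : (offI 2014).toNat = 0 := by decide
  have := loopA_eq_procB 9 2014 data PySem.Dict.empty (by norm_num) (by norm_num)
    (fun k _ => by rfl)
  rw [h0, List.drop_zero] at this
  rw [this, procB_eq_foldl]
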